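-- pv_equiv track=rewrite | github.com/kipple99/CodingTestStudy | 프로그래머스/lv1/131128. 숫자 짝꿍/숫자 짝꿍.py | solution
-- ===== SOURCE A (Python) =====
-- def solution(X, Y):
--     X = list(X)
--     Y = list(Y)
--     str_list = []
--
--     for i in X:
--         if i in Y:
--             str_list.append(i)
--             del Y[Y.index(i)]
--
--     if str_list:
--         answer_list = sorted(str_list, reverse=True)
--         if answer_list[0] == '0':
--             answer = '0'
--             return answer
--         answer = ''.join(answer_list)
--     else:
--         answer = '-1'
--
--     return answer
-- ===== SOURCE B (Python) =====
-- def solution(X, Y):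
--     # counting-sort construction: emit each common digit/char, largest first,
--     # min-multiplicity times; no scan-and-delete, no sort of the result list
--     s = ''.join(c * min(X.count(c), Y.count(c)) for c in sorted(set(X), reverse=True))
--     if not s:
--         return '-1'
--     if s[0] == '0':
--         return '0'
--     return s
-- ===== Notes on version B (the rewrite author's own statement) =====
-- stated objective: faster
-- what changed: B replaces A's quadratic scan-and-delete loop over Y plus a final sort with a direct counting-sort construction: for each distinct char of X in descending order it emits the char min(X.count, Y.count) times.
import Mathlib
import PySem

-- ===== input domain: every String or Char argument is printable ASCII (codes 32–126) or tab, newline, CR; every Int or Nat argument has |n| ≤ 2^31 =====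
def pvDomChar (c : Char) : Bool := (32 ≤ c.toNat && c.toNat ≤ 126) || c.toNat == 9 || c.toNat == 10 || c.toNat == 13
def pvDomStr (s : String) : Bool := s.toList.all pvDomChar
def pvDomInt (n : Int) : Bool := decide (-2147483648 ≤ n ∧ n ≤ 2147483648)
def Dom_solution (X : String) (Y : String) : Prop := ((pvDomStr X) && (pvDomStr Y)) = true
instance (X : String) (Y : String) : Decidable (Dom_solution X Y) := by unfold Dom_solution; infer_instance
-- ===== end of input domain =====

-- B rebuilds the answer counting-sort style (each common char, largest first, with
-- min multiplicity) instead of A's scan-and-delete loop followed by a sort.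

-- ===== PORT A =====
-- for i in X: if i in Y: str_list.append(i); del Y[Y.index(i)]
-- (the membership-guarded 'del Y[Y.index(i)]' deletes the first occurrence = List.erase)
def pvLoopA (Xl Yl : List Char) : List Char × List Char :=
  Xl.foldl (fun (s : List Char × List Char) i =>
    if i ∈ s.2 then (s.1 ++ [i], s.2.erase i) else s) (([] : List Char), Yl)

def solution (X : String) (Y : String) : String :=
  if (pvLoopA X.toList Y.toList).1 ≠ [] then
    -- answer_list = sorted(str_list, reverse=True)
    if PySem.List.pyGet? (PySem.List.sorted (pvLoopA X.toList Y.toList).1 (fun c => c) true) 0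
        = some '0' then "0"
    else String.ofList (PySem.List.sorted (pvLoopA X.toList Y.toList).1 (fun c => c) true)
  else "-1"

-- ===== PORT B =====
-- ''.join(c * min(X.count(c), Y.count(c)) for c in sorted(set(X), reverse=True))
-- ('c * n' string repetition ported as List.replicate — exact)
def pvBlocksB (Xl Yl : List Char) : List Char :=
  ((PySem.List.sorted (PySem.Set.ofList Xl) (fun c => c) true).map
    (fun c => List.replicate (min (Xl.count c) (Yl.count c)) c)).flatten

def solution_alt (X : String) (Y : String) : String :=
  if pvBlocksB X.toList Y.toList = [] then "-1"
  else if PySem.List.pyGet? (pvBlocksB X.toList Y.toList) 0 = some '0' then "0"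
  else String.ofList (pvBlocksB X.toList Y.toList)

-- ===== PRECONDITION & SPEC =====
def Spec_solution (X : String) (Y : String) (out : String) : Prop := out = solution_alt X Y
instance (X : String) (Y : String) (out : String) : Decidable (Spec_solution X Y out) := by unfold Spec_solution; infer_instance

-- ===== CLAIM (what is proved, stated in full; the proofs are below) =====
def Claim_equal_solution : Prop := ∀ (X : String) (Y : String), Dom_solution X Y → Spec_solution X Y (solution X Y)

-- ===== LEMMAS AND PROOFS =====

-- A's loop collects every char with min multiplicity
theorem loopA_count (Xl : List Char) : ∀ (Yl acc : List Char) (c : Char),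
    (Xl.foldl (fun (s : List Char × List Char) i =>
      if i ∈ s.2 then (s.1 ++ [i], s.2.erase i) else s) (acc, Yl)).1.count c
    = acc.count c + min (Xl.count c) (Yl.count c) := by
  induction Xl with
  | nil => intro Yl acc c; simp
  | cons i rest ih =>
    intro Yl acc c
    simp only [List.foldl_cons]
    by_cases hm : i ∈ Yl
    · rw [if_pos hm, ih]
      by_cases h : i = c
      · subst h
        have hpos : 1 ≤ Yl.count i := List.one_le_count_iff.mpr hm
        have e1 : (acc ++ [i]).count i = acc.count i + 1 := by simp
        have e2 : (Yl.erase i).count i = Yl.count i - 1 := List.count_erase_self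
        have e3 : (i :: rest).count i = rest.count i + 1 := List.count_cons_self
        rw [e1, e2, e3]
        omega
      · have h' : c ≠ i := fun e => h e.symm
        rw [List.count_erase_of_ne h', List.count_append]
        simp [h]
    · rw [if_neg hm, ih]
      have hz : Yl.count i = 0 := List.count_eq_zero.mpr hm
      by_cases h : i = c
      · subst h; simp [List.count_cons_self, hz]
      · simp [h]


-- count of B's flattened blocks, for nodup keys
theorem count_blocks (f : Char → Nat) (x : Char) : ∀ (keys : List Char), keys.Nodup →
    ((keys.map (fun c => List.replicate (f c) c)).flatten).count x
    = if x ∈ keys then f x else 0 := by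
  intro keys
  induction keys with
  | nil => simp
  | cons k ks ih =>
    intro hnd
    obtain ⟨hk, hks⟩ := List.nodup_cons.mp hnd
    simp only [List.map_cons, List.flatten_cons, List.count_append]
    rw [ih hks]
    by_cases h : x = k
    · subst h; simp [hk]
    · have h' : ¬ k = x := fun e => h e.symm
      rw [List.count_replicate, if_neg (by simp [h'])]
      simp [h]

-- the core: A's sorted common list equals B's counting-sort construction
theorem key_eq (Xl Yl : List Char) :
    PySem.List.sorted (pvLoopA Xl Yl).1 (fun c => c) true = pvBlocksB Xl Yl := by
  have hknd : (PySem.List.sorted (PySem.Set.ofList Xl) (fun c => c) true).Nodup :=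
    (PySem.List.sorted_perm (PySem.Set.ofList Xl) (fun c => c) true).nodup_iff.mpr
      (PySem.Set.nodup_ofList Xl)
  have hkge : (PySem.List.sorted (PySem.Set.ofList Xl) (fun c => c) true).Pairwise
      (fun a b => b ≤ a) := PySem.List.sorted_pairwise_rev _ _
  have hkgt : (PySem.List.sorted (PySem.Set.ofList Xl) (fun c => c) true).Pairwise
      (fun a b => b < a) :=
    (hkge.and hknd).imp (fun h => lt_of_le_of_ne h.1 (Ne.symm h.2))
  have hcs : ∀ c, (pvBlocksB Xl Yl).count c = min (Xl.count c) (Yl.count c) := by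
    intro c
    rw [pvBlocksB, count_blocks _ _ _ hknd]
    by_cases h : c ∈ PySem.List.sorted (PySem.Set.ofList Xl) (fun c => c) true
    · simp [h]
    · have hx : c ∉ Xl := fun hc =>
        h ((PySem.List.mem_sorted _ _ _ _).mpr ((PySem.Set.mem_ofList Xl c).mpr hc))
      simp [h, List.count_eq_zero.mpr hx]
  have hca : ∀ c, (PySem.List.sorted (pvLoopA Xl Yl).1 (fun c => c) true).count c
      = min (Xl.count c) (Yl.count c) := by
    intro c
    rw [(PySem.List.sorted_perm _ _ _).count_eq, pvLoopA, loopA_count]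
    simp
  have hperm : (PySem.List.sorted (pvLoopA Xl Yl).1 (fun c => c) true).Perm (pvBlocksB Xl Yl) :=
    List.perm_iff_count.mpr (fun c => by rw [hca, hcs])
  have hsal : (PySem.List.sorted (pvLoopA Xl Yl).1 (fun c => c) true).Pairwise
      (fun a b : Char => b ≤ a) := PySem.List.sorted_pairwise_rev _ _
  have hss : (pvBlocksB Xl Yl).Pairwise (fun a b : Char => b ≤ a) := by
    rw [pvBlocksB, List.pairwise_flatten]
    refine ⟨?_, ?_⟩
    · intro l hl
      obtain ⟨c, _, rfl⟩ := List.mem_map.mp hl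
      exact List.pairwise_replicate.mpr (Or.inr le_rfl)
    · rw [List.pairwise_map]
      exact hkgt.imp (fun {a b} h x hx y hy => by
        rw [List.eq_of_mem_replicate hx, List.eq_of_mem_replicate hy]
        exact le_of_lt h)
  exact List.Perm.eq_of_pairwise
    (fun a b _ _ h1 h2 => le_antisymm h2 h1) hsal hss hperm

theorem solution_spec : Claim_equal_solution := by
  unfold Claim_equal_solution Spec_solution
  intro X Y _
  unfold solution solution_alt
  have heq := key_eq X.toList Y.toList
  have hnil : (pvLoopA X.toList Y.toList).1 = [] ↔ pvBlocksB X.toList Y.toList = [] := by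
    rw [← heq, PySem.List.sorted_eq_nil_iff]
  by_cases hne : (pvLoopA X.toList Y.toList).1 = []
  · rw [if_neg (by simp [hne]), if_pos (hnil.mp hne)]
  · rw [if_pos hne, if_neg (fun h => hne (hnil.mpr h)), heq]
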